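-- pv_equiv track=rewrite | github.com/KahfKids/KidsGames | generate_asset_cache.py | generate_service_worker_assets
-- ===== SOURCE A (Python) =====
-- def generate_service_worker_assets(categorized_assets):
--     """Generate the STATIC_ASSETS array for the service worker."""
--
--     # Core PWA files
--     core_assets = [
--         '/KidsGames/',
--         '/KidsGames/index.html',
--         '/KidsGames/manifest.json',
--         '/KidsGames/sw.js'
--     ]
--
--     # Add high priority assets (CSS and JS)
--     high_priority = []
--     high_priority.extend(categorized_assets.get('css', []))
--     high_priority.extend(categorized_assets.get('js', []))
--     high_priority.extend(categorized_assets.get('fonts', []))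
--
--     # Add medium priority assets (essential images)
--     medium_priority = []
--     for img in categorized_assets.get('images', []):
--         # Include icons and essential UI images
--         if any(keyword in img.lower() for keyword in ['icon', 'logo', 'ui', 'button', 'background']):
--             medium_priority.append(img)
--
--     # Add low priority assets (all other images and media)
--     low_priority = []
--     for img in categorized_assets.get('images', []):
--         if img not in medium_priority:
--             low_priority.append(img)
--
--     low_priority.extend(categorized_assets.get('media', []))
--
--     return {
--         'core': core_assets,
--         'high_priority': high_priority,
--         'medium_priority': medium_priority,
--         'low_priority': low_priority
--     }
-- ===== SOURCE B (Python) =====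
-- def generate_service_worker_assets(categorized_assets):
--     """Generate the STATIC_ASSETS array for the service worker."""
--
--     def get(key):
--         return categorized_assets.get(key, [])
--
--     def is_essential(img):
--         return any(kw in img.lower() for kw in ['icon', 'logo', 'ui', 'button', 'background'])
--
--     images = get('images')
--     return {
--         'core': [
--             '/KidsGames/',
--             '/KidsGames/index.html',
--             '/KidsGames/manifest.json',
--             '/KidsGames/sw.js'
--         ],
--         'high_priority': [a for key in ('css', 'js', 'fonts') for a in get(key)],
--         'medium_priority': [img for img in images if is_essential(img)],
--         'low_priority': [img for img in images if not is_essential(img)] + get('media'),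
--     }
-- ===== Notes on version B (the rewrite author's own statement) =====
-- stated objective: simpler
-- what changed: A's imperative loops with mutable list accumulators (including the second pass that re-scans all images with a 'not in medium_priority' membership test) are replaced by declarative comprehensions: one filter for essential images, one complementary filter for the rest, and a flattening comprehension over the three high-priority keys, so no mutable state and no quadratic membership scan remain.
import Mathlib
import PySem

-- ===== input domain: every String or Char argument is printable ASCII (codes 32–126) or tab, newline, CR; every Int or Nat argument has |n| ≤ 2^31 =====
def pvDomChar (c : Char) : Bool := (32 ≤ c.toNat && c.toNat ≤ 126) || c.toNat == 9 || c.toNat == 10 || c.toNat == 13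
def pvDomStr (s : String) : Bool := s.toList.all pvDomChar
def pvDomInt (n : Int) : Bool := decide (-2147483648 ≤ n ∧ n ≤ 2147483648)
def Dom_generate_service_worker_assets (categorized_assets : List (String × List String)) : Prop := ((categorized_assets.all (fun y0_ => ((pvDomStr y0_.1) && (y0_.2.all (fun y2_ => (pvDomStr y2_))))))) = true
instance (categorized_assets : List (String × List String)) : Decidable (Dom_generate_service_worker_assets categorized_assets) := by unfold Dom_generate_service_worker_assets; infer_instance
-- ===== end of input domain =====

-- B replaces A's imperative accumulator loops (and the quadratic 'not in medium_priority'
-- re-scan) with declarative filters/comprehensions (objective: simpler).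

-- shared helper: categorized_assets.get(k, [])  (first-match lookup on the assoc list)
def pvGetList (d : List (String × List String)) (k : String) : List String :=
  (PySem.Dict.mk d).getD k []

-- any(keyword in img.lower() for keyword in ['icon', 'logo', 'ui', 'button', 'background'])
def pvKwMatch (img : String) : Bool :=
  (["icon", "logo", "ui", "button", "background"]).any
    (fun kw => PySem.Str.isIn kw (PySem.Str.lower img))

-- ===== PORT A =====
def generate_service_worker_assets (categorized_assets : List (String × List String)) : List (String × List String) :=
  let core_assets := ["/KidsGames/", "/KidsGames/index.html", "/KidsGames/manifest.json", "/KidsGames/sw.js"]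
  let high_priority := ([] ++ pvGetList categorized_assets "css")
      ++ pvGetList categorized_assets "js" ++ pvGetList categorized_assets "fonts"
  let medium_priority := (pvGetList categorized_assets "images").foldl
      (fun acc img => if pvKwMatch img then acc ++ [img] else acc) []
  let low_priority := (pvGetList categorized_assets "images").foldl
      (fun acc img => if medium_priority.contains img then acc else acc ++ [img]) []
  let low_priority := low_priority ++ pvGetList categorized_assets "media"
  [("core", core_assets), ("high_priority", high_priority),
   ("medium_priority", medium_priority), ("low_priority", low_priority)]

-- ===== PORT B =====
def generate_service_worker_assets_alt (categorized_assets : List (String × List String)) : List (String × List String) :=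
  let images := pvGetList categorized_assets "images"
  [("core", ["/KidsGames/", "/KidsGames/index.html", "/KidsGames/manifest.json", "/KidsGames/sw.js"]),
   ("high_priority", (["css", "js", "fonts"]).flatMap (fun key => pvGetList categorized_assets key)),
   ("medium_priority", images.filter (fun img => pvKwMatch img)),
   ("low_priority", images.filter (fun img => !pvKwMatch img) ++ pvGetList categorized_assets "media")]

-- ===== PRECONDITION & SPEC =====
def Spec_generate_service_worker_assets (categorized_assets : List (String × List String)) (out : List (String × List String)) : Prop := out = generate_service_worker_assets_alt categorized_assets
instance (categorized_assets : List (String × List String)) (out : List (String × List String)) : Decidable (Spec_generate_service_worker_assets categorized_assets out) := by unfold Spec_generate_service_worker_assets; infer_instance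

-- ===== CLAIM (what is proved, stated in full; the proofs are below) =====
def Claim_equal_generate_service_worker_assets : Prop := ∀ (categorized_assets : List (String × List String)), Dom_generate_service_worker_assets categorized_assets → Spec_generate_service_worker_assets categorized_assets (generate_service_worker_assets categorized_assets)

-- ===== LEMMAS AND PROOFS =====

-- A's first image loop collects exactly the keyword-matching images.
theorem pvMedA (l : List String) :
    l.foldl (fun acc img => if pvKwMatch img then acc ++ [img] else acc) [] = l.filter pvKwMatch := by
  simpa using PySem.List.foldl_append_if_eq_filter (l := l) (acc := []) (p := pvKwMatch)

-- the 'else append' loop collects the non-matching elements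
theorem pvElseFilter (l : List String) (acc : List String) :
    l.foldl (fun acc img => if pvKwMatch img then acc else acc ++ [img]) acc
      = acc ++ l.filter (fun img => !pvKwMatch img) := by
  have h : ∀ (a : List String) (x : String),
      (if pvKwMatch x then a else a ++ [x]) = (if (!pvKwMatch x) = true then a ++ [x] else a) := by
    intro a x; cases h : pvKwMatch x <;> simp [h]
  calc l.foldl (fun acc img => if pvKwMatch img then acc else acc ++ [img]) acc
      = l.foldl (fun acc img => if (!pvKwMatch img) = true then acc ++ [img] else acc) acc := by
        simp only [h]
    _ = acc ++ l.filter (fun img => !pvKwMatch img) :=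
        PySem.List.foldl_append_if_eq_filter (l := l) (acc := acc) (p := fun img => !pvKwMatch img)

-- for an image drawn from the list, membership in the filtered list is the keyword test
theorem pvContainsFilter (l : List String) (img : String) (h : img ∈ l) :
    (l.filter pvKwMatch).contains img = pvKwMatch img := by
  cases hm : pvKwMatch img
  · simp [List.mem_filter, hm]
  · simp [List.mem_filter, h, hm]

-- A's second image loop, with its membership test resolved, is the non-matching filter
theorem pvLowA (l : List String) :
    l.foldl (fun acc img => if (l.filter pvKwMatch).contains img then acc else acc ++ [img]) []
      = l.filter (fun img => !pvKwMatch img) := by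
  have := PySem.List.foldl_congr_mem (l := l)
    (fun acc img => if (l.filter pvKwMatch).contains img then acc else acc ++ [img])
    (fun acc img => if pvKwMatch img then acc else acc ++ [img]) []
    (by intro a x hx; simp only [pvContainsFilter l x hx])
  rw [this, pvElseFilter]; simp

-- ===== VERDICT (by name: the statement is the Claim_ definition above) =====
theorem generate_service_worker_assets_spec : Claim_equal_generate_service_worker_assets := by
  intro ca _
  unfold Spec_generate_service_worker_assets generate_service_worker_assets generate_service_worker_assets_alt
  simp only [pvMedA, pvLowA, List.flatMap_cons, List.flatMap_nil, List.append_nil, List.nil_append,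
    List.append_assoc]
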